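-- pv_equiv track=rewrite | github.com/mmaitland300/Research-Radar | services/pipeline/pipeline/corpus_v2_ingest_from_plan.py | _metadata_warnings
-- ===== SOURCE A (Python) =====
-- from typing import Any, Mapping
--
-- def _metadata_warnings(selected_candidates: list[Any]) -> list[str]:
--     warnings: list[str] = []
--     if any(isinstance(c, Mapping) and not c.get("abstract") for c in selected_candidates):
--         warnings.append("Candidate plan omits abstracts for one or more works; abstract remains NULL until text hydration.")
--     if any(isinstance(c, Mapping) and not (c.get("type") or c.get("work_type")) for c in selected_candidates):
--         warnings.append(
--             "Candidate plan omits OpenAlex work type for one or more works; stored missing type as 'unknown' "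
--             "and did not validate it as an included document type."
--         )
--     if any(isinstance(c, Mapping) and not c.get("language") for c in selected_candidates):
--         warnings.append(
--             "Candidate plan omits language for one or more works; stored missing language as 'en' from the "
--             "candidate-plan policy filter, not observed OpenAlex metadata."
--         )
--     warnings.append("No live OpenAlex enrichment, embeddings, clustering, ranking, or bridge-weight writes were run.")
--     return warnings
-- ===== SOURCE B (Python) =====
-- from typing import Any, Mapping
--
-- def _metadata_warnings(selected_candidates: list) -> list:
--     missing_abstract = missing_type = missing_language = False
--     for c in selected_candidates:
--         if isinstance(c, Mapping):
--             if not c.get("abstract"):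
--                 missing_abstract = True
--             if not (c.get("type") or c.get("work_type")):
--                 missing_type = True
--             if not c.get("language"):
--                 missing_language = True
--     warnings: list[str] = []
--     if missing_abstract:
--         warnings.append("Candidate plan omits abstracts for one or more works; abstract remains NULL until text hydration.")
--     if missing_type:
--         warnings.append(
--             "Candidate plan omits OpenAlex work type for one or more works; stored missing type as 'unknown' "
--             "and did not validate it as an included document type."
--         )
--     if missing_language:
--         warnings.append(
--             "Candidate plan omits language for one or more works; stored missing language as 'en' from the "
--             "candidate-plan policy filter, not observed OpenAlex metadata."
--         )
--     warnings.append("No live OpenAlex enrichment, embeddings, clustering, ranking, or bridge-weight writes were run.")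
--     return warnings
-- ===== Notes on version B (the rewrite author's own statement) =====
-- stated objective: simpler
-- what changed: Three separate any() generator scans over the candidate list are replaced by a single pass that accumulates three booleans (missing abstract / type-or-work_type / language), then the warnings are emitted from the flags in the same fixed order.
import Mathlib
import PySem

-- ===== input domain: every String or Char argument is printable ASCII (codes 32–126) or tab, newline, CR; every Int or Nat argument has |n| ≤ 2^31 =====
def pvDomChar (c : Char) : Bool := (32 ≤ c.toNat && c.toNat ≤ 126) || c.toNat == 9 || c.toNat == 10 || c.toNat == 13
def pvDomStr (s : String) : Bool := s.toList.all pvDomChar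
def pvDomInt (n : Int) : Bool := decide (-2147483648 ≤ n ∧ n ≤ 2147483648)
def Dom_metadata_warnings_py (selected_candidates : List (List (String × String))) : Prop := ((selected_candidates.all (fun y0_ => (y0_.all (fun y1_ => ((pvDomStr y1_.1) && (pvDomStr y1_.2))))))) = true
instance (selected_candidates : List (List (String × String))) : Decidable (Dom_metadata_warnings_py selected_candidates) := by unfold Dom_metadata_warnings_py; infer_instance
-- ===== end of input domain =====

-- B replaces A's three separate any() scans by one pass accumulating three booleans (simpler; same exact output).

-- shared dict primitives: first-match lookup (Python dict.get) and Python falsiness of a str-or-None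
def pvLookup? (c : List (String × String)) (k : String) : Option String :=
  match c with
  | [] => none
  | (k', v) :: rest => if k' == k then some v else pvLookup? rest k

-- Python 'not c.get(k)': true when the key is absent or its value is the empty string
def pvFalsy (o : Option String) : Bool :=
  match o with
  | none => true
  | some s => s == ""

def pvWarnAbstract : String := "Candidate plan omits abstracts for one or more works; abstract remains NULL until text hydration."
def pvWarnType : String := "Candidate plan omits OpenAlex work type for one or more works; stored missing type as 'unknown' and did not validate it as an included document type."
def pvWarnLang : String := "Candidate plan omits language for one or more works; stored missing language as 'en' from the candidate-plan policy filter, not observed OpenAlex metadata."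
def pvWarnTrailer : String := "No live OpenAlex enrichment, embeddings, clustering, ranking, or bridge-weight writes were run."

-- ===== PORT A =====
-- every candidate is a dict here (list[dict[str,str]]), so 'isinstance(c, Mapping)' is always True
def metadata_warnings_py (selected_candidates : List (List (String × String))) : List String :=
  let warnings : List String := []
  let warnings := if selected_candidates.any (fun c => pvFalsy (pvLookup? c "abstract")) then warnings ++ [pvWarnAbstract] else warnings
  let warnings := if selected_candidates.any (fun c => pvFalsy (pvLookup? c "type") && pvFalsy (pvLookup? c "work_type")) then warnings ++ [pvWarnType] else warnings
  let warnings := if selected_candidates.any (fun c => pvFalsy (pvLookup? c "language")) then warnings ++ [pvWarnLang] else warnings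
  warnings ++ [pvWarnTrailer]

-- ===== PORT B =====
-- one pass over the candidates maintaining the three missing-… flags
def pvStepB (st : Bool × Bool × Bool) (c : List (String × String)) : Bool × Bool × Bool :=
  ( st.1 || pvFalsy (pvLookup? c "abstract")
  , st.2.1 || (pvFalsy (pvLookup? c "type") && pvFalsy (pvLookup? c "work_type"))
  , st.2.2 || pvFalsy (pvLookup? c "language") )

def metadata_warnings_py_alt (selected_candidates : List (List (String × String))) : List String :=
  let flags := selected_candidates.foldl pvStepB (false, false, false)
  let warnings : List String := []
  let warnings := if flags.1 then warnings ++ [pvWarnAbstract] else warnings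
  let warnings := if flags.2.1 then warnings ++ [pvWarnType] else warnings
  let warnings := if flags.2.2 then warnings ++ [pvWarnLang] else warnings
  warnings ++ [pvWarnTrailer]

-- ===== PRECONDITION & SPEC =====
def Spec_metadata_warnings_py (selected_candidates : List (List (String × String))) (out : List String) : Prop := out = metadata_warnings_py_alt selected_candidates
instance (selected_candidates : List (List (String × String))) (out : List String) : Decidable (Spec_metadata_warnings_py selected_candidates out) := by unfold Spec_metadata_warnings_py; infer_instance

-- ===== CLAIM (what is proved, stated in full; the proofs are below) =====
def Claim_equal_metadata_warnings_py : Prop := ∀ (selected_candidates : List (List (String × String))), Dom_metadata_warnings_py selected_candidates → Spec_metadata_warnings_py selected_candidates (metadata_warnings_py selected_candidates)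

-- ===== LEMMAS AND PROOFS =====
theorem pvFoldB (sc : List (List (String × String))) (a t l : Bool) :
    sc.foldl pvStepB (a, t, l) =
      ( a || sc.any (fun c => pvFalsy (pvLookup? c "abstract"))
      , t || sc.any (fun c => pvFalsy (pvLookup? c "type") && pvFalsy (pvLookup? c "work_type"))
      , l || sc.any (fun c => pvFalsy (pvLookup? c "language")) ) := by
  induction sc generalizing a t l with
  | nil => simp
  | cons c rest ih =>
    simp only [List.foldl_cons, List.any_cons, pvStepB, ih, Bool.or_assoc]

-- ===== VERDICT (by name: the statement is the Claim_ definition above) =====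
theorem metadata_warnings_py_spec : Claim_equal_metadata_warnings_py := by
  intro sc _
  show metadata_warnings_py sc = metadata_warnings_py_alt sc
  simp only [metadata_warnings_py, metadata_warnings_py_alt, pvFoldB, Bool.false_or]
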